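-- pv_equiv track=rewrite | github.com/nitrodragonoid/John-Nashs-Demon | Combinatorial_Games.py | is_full
-- ===== SOURCE A (Python) =====
-- def is_full(grid):
--     for i in range(len(grid)):
--         for j in range(len(grid[i])):
--             if grid[i][j] == 0:
--                 if i+1 >= len(grid):
--                     pass
--                 else:
--                     if grid[i+1][j] == 0:
--                         return False
--                 if j+1 >= len(grid[i]):
--                     pass
--                 else:
--                     if grid[i][j+1] == 0:
--                         return False
--     return True
-- ===== SOURCE B (Python) =====
-- def is_full(grid):
--     # horizontal pass
--     for row in grid:
--         for j in range(len(row) - 1):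
--             if row[j] == 0 and row[j + 1] == 0:
--                 return False
--     # vertical pass
--     for i in range(len(grid) - 1):
--         for j in range(len(grid[i])):
--             if grid[i][j] == 0 and grid[i + 1][j] == 0:
--                 return False
--     return True
-- ===== Notes on version B (the rewrite author's own statement) =====
-- stated objective: simpler
-- what changed: Replaced the single nested per-cell check (which tests the right and below neighbours of every zero with explicit bounds branches) by two separate plain passes: a horizontal pass over each row's adjacent pairs and a vertical pass over adjacent row pairs.
-- outside the precondition, e.g. on is_full([[0, 0], [0]]): A returns False, B returns False; on is_full([[1, 0], []]): A raises IndexError, B raises IndexError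
import Mathlib
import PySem

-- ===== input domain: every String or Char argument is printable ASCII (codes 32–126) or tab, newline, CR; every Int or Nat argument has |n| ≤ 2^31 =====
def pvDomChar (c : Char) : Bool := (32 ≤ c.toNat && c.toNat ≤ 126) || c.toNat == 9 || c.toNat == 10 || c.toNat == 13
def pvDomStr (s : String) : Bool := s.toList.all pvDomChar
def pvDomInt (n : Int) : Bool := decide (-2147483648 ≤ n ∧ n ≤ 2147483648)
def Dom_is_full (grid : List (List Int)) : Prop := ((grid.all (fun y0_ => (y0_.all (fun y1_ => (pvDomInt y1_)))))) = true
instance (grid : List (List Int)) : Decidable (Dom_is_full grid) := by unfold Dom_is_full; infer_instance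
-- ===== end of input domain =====

-- B restructures A's single nested per-cell neighbour check into two separate plain passes
-- (horizontal adjacent pairs per row, then vertical adjacent row pairs); objective: simpler.


-- ===== PORT A =====
-- j-loop of A over row = grid[i]: at cell row[j] == 0, A checks grid[i+1][j] (when i+1 < len(grid),
-- here next? = some next) and row[j+1] (= head of the rest of the row).
-- next.getD j 1 is exact inside Pre_is_full; the out-of-range case (IndexError in Python) is excluded by Pre_.
def pvARow (row : List Int) (next? : Option (List Int)) (j : Nat) : Bool :=
  match row with
  | [] => true
  | x :: rest =>
      -- (next?.getD []).getD j 1 = 0 holds iff i+1 < len(grid) and grid[i+1][j] == 0 (defaults 1/[] never hit 0);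
      -- rest.headD 1 = 0 holds iff j+1 < len(row) and row[j+1] == 0.
      if x = 0 ∧ ((next?.getD []).getD j 1 = 0 ∨ rest.headD 1 = 0)
      then false
      else pvARow rest next? (j + 1)

-- i-loop of A: rest.head? is grid[i+1] when it exists.
def pvARows : List (List Int) → Bool
  | [] => true
  | row :: rest => if pvARow row rest.head? 0 then pvARows rest else false

def is_full (grid : List (List Int)) : Bool := pvARows grid

-- ===== PORT B =====
-- Horizontal pass: adjacent pair inside one row (row[j], row[j+1] = head of rest).
def pvHRow : List Int → Bool
  | [] => true
  | x :: rest =>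
      -- rest.headD 1 = 0 iff the next cell of the row exists and is 0 (default 1 is never 0)
      if x = 0 ∧ rest.headD 1 = 0 then false else pvHRow rest

def pvHPass : List (List Int) → Bool
  | [] => true
  | row :: rest => if pvHRow row then pvHPass rest else false

-- Vertical pass: j-loop over grid[i], comparing with grid[i+1][j].
-- next.getD j 1 is exact inside Pre_is_full (out-of-range raises IndexError in Python, excluded by Pre_).
def pvVPair (row next : List Int) (j : Nat) : Bool :=
  match row with
  | [] => true
  | x :: rest => if x = 0 ∧ next.getD j 1 = 0 then false else pvVPair rest next (j + 1)

def pvVPass : List (List Int) → Bool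
  | [] => true
  | [_] => true
  | row :: next :: rest => if pvVPair row next 0 then pvVPass (next :: rest) else false

def is_full_alt (grid : List (List Int)) : Bool :=
  if pvHPass grid then pvVPass grid else false

-- ===== PRECONDITION & SPEC =====
-- Pre_ excludes exactly the ragged grids on which the vertical neighbour access grid[i+1][j] is
-- out of range at some zero cell grid[i][j]: there Python A (and B) raises IndexError, except when an
-- earlier adjacency already returned False (slightly narrower than raising; see claim cites).
def Pre_is_full (grid : List (List Int)) : Prop :=
  ∀ i < grid.length - 1, ∀ j < (grid.getD i []).length,
    (grid.getD i []).getD j 1 = 0 → j < (grid.getD (i + 1) []).length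
instance (grid : List (List Int)) : Decidable (Pre_is_full grid) := by
  unfold Pre_is_full; infer_instance

def pvWitness_is_full : List (List Int) := [[1, 0], [2, 3]]

def Spec_is_full (grid : List (List Int)) (out : Bool) : Prop := out = is_full_alt grid
instance (grid : List (List Int)) (out : Bool) : Decidable (Spec_is_full grid out) := by
  unfold Spec_is_full; infer_instance

-- ===== CLAIM (what is proved, stated in full; the proofs are below) =====
def Claim_equal_is_full : Prop :=
  ∀ (grid : List (List Int)), Dom_is_full grid → Pre_is_full grid → Spec_is_full grid (is_full grid)

-- ===== LEMMAS AND PROOFS =====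

theorem pvARow_eq (row : List Int) (next? : Option (List Int)) (j : Nat) :
    pvARow row next? j = (pvHRow row && pvVPair row (next?.getD []) j) := by
  induction row generalizing j with
  | nil => simp [pvARow, pvHRow, pvVPair]
  | cons x rest ih =>
    simp only [pvARow, pvHRow, pvVPair]
    by_cases hx : x = 0 <;>
      by_cases hv : (next?.getD []).getD j 1 = 0 <;>
        by_cases hh : rest.headD 1 = 0 <;>
          simp_all [ih]

theorem pvVPair_nil (row : List Int) (j : Nat) : pvVPair row [] j = true := by
  induction row generalizing j with
  | nil => rfl
  | cons x rest ih => simp [pvVPair, ih]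

theorem pvARows_eq (grid : List (List Int)) :
    pvARows grid = (pvHPass grid && pvVPass grid) := by
  induction grid with
  | nil => rfl
  | cons row rest ih =>
    cases rest with
    | nil =>
      have L : pvARows [row] = if pvARow row none 0 then pvARows [] else false := rfl
      rw [L, pvARow_eq]
      simp [pvVPair_nil, pvARows, pvHPass, pvVPass]
    | cons next rest' =>
      have L : pvARows (row :: next :: rest')
          = if pvARow row (some next) 0 then pvARows (next :: rest') else false := rfl
      rw [L, pvARow_eq, ih]
      cases h1 : pvHRow row <;> cases h2 : pvVPair row next 0 <;>
        simp [pvHPass, pvVPass, h1, h2]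

-- ===== VERDICT (by name: the statement is the Claim_ definition above) =====
theorem is_full_spec : Claim_equal_is_full := by
  intro grid _ _
  unfold Spec_is_full is_full is_full_alt
  rw [pvARows_eq]
  cases pvHPass grid <;> simp
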